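-- pv_equiv track=rewrite | github.com/VladVynnytskyi/Codewars | 5kyu/Pick peaks.py | pick_peaks
-- ===== SOURCE A (Python) =====
-- def pick_peaks(arr):
--     result = {
--         'pos': [],
--         'peaks': []
--     }
--
--     plateau_start = None
--
--     for el in range(1, len(arr)-1):
--         if arr[el-1] < arr[el] > arr[el+1]:
--             result['pos'].append(el)
--             result['peaks'].append(arr[el])
--
--         elif arr[el-1] < arr[el] == arr[el+1]:
--             plateau_start = el
--
--         elif plateau_start is not None and arr[el] > arr[el+1]:
--             result['pos'].append(plateau_start)
--             result['peaks'].append(arr[plateau_start])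
--             plateau_start = None
--
--         elif arr[el] < arr[el+1]:
--             plateau_start = None
--
--     return result
-- ===== SOURCE B (Python) =====
-- def pick_peaks(arr):
--     pos = []
--     prev = None
--     for i, (left, right) in enumerate(zip(arr, arr[1:]), 1):
--         if right > left:
--             prev = i
--         elif right < left and prev is not None:
--             pos.append(prev)
--             prev = None
--     return {'pos': pos, 'peaks': [arr[p] for p in pos]}
-- ===== Notes on version B (the rewrite author's own statement) =====
-- stated objective: simpler
-- what changed: Replaces A's four-way indexed comparison of each triple (arr[el-1], arr[el], arr[el+1]) with a plateau_start dict-state machine by a pairwise scan over enumerate(zip(arr, arr[1:])) keeping only one `prev` index (last strict rise) and recording it on a strict descent; peaks are derived from pos by a final map instead of a second accumulator.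
import Mathlib
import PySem

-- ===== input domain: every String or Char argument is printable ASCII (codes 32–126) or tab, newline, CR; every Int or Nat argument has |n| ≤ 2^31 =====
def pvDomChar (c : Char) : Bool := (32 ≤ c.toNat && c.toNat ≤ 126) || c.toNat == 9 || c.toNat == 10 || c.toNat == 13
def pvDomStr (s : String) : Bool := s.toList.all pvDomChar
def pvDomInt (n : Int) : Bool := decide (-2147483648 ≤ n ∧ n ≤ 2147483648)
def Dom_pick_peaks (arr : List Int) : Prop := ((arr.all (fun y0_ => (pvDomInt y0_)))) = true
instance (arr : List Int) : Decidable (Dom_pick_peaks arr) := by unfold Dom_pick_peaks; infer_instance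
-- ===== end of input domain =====

-- B replaces A's four-way indexed triple comparison with dict state by a pairwise scan over
-- enumerate(zip(arr, arr[1:])) keeping one `prev` index, peaks derived by a final map
-- (simpler decomposition, same O(n) cost); return values proved equal on all inputs.

-- ===== PORT A =====
-- loop state: (result['pos'], result['peaks'], plateau_start)
-- indices el-1, el, el+1 are always in range for el ∈ range(1, len(arr)-1), so pyGetD's default is never used
def stepA (arr : List Int) (s : List Int × List Int × Option Int) (el : Int) :
    List Int × List Int × Option Int :=
  let g := fun i => PySem.List.pyGetD arr i 0
  match s with
  | (pos, peaks, pl) =>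
    if g (el-1) < g el ∧ g el > g (el+1) then (pos ++ [el], peaks ++ [g el], pl)
    else if g (el-1) < g el ∧ g el = g (el+1) then (pos, peaks, some el)
    else if pl.isSome ∧ g el > g (el+1) then
      (pos ++ [pl.getD 0], peaks ++ [g (pl.getD 0)], none)
    else if g el < g (el+1) then (pos, peaks, none)
    else (pos, peaks, pl)

def pick_peaks (arr : List Int) : List (String × List Int) :=
  let r := (PySem.List.pyRange 1 ((arr.length : Int) - 1) 1).foldl (stepA arr) ([], [], none)
  [("pos", r.1), ("peaks", r.2.1)]

-- ===== PORT B =====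
-- loop state: (pos, prev); scans the pairs zip(arr, arr[1:]) enumerated from 1
def stepB (s : List Int × Option Int) (e : Int × Int × Int) : List Int × Option Int :=
  match s, e with
  | (pos, prev), (i, left, right) =>
    if right > left then (pos, some i)
    else if right < left ∧ prev.isSome then (pos ++ [prev.getD 0], none)
    else (pos, prev)

def pick_peaks_alt (arr : List Int) : List (String × List Int) :=
  let pairs := PySem.List.enumerate ((arr.zip (arr.drop 1)).map (fun p => (p.1, p.2))) 1
  let r := pairs.foldl (fun s e => stepB s (e.1, e.2.1, e.2.2)) ([], none)
  [("pos", r.1), ("peaks", r.1.map (fun p => PySem.List.pyGetD arr p 0))]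

-- ===== PRECONDITION & SPEC =====
def Spec_pick_peaks (arr : List Int) (out : List (String × List Int)) : Prop := out = pick_peaks_alt arr
instance (arr : List Int) (out : List (String × List Int)) : Decidable (Spec_pick_peaks arr out) := by unfold Spec_pick_peaks; infer_instance

-- ===== CLAIM (what is proved, stated in full; the proofs are below) =====
def Claim_equal_pick_peaks : Prop := ∀ (arr : List Int), Dom_pick_peaks arr → Spec_pick_peaks arr (pick_peaks arr)

-- ===== LEMMAS AND PROOFS =====

-- partial folds of the two loops: A after el = 1..k-1, B after pair index i = 1..k
def afold (arr : List Int) (k : Int) : List Int × List Int × Option Int :=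
  (PySem.List.pyRange 1 k 1).foldl (stepA arr) ([], [], none)
def bfold (arr : List Int) (k : Int) : List Int × Option Int :=
  (PySem.List.pyRange 1 k 1).foldl
    (fun s i => stepB s (i, PySem.List.pyGetD arr (i-1) 0, PySem.List.pyGetD arr i 0)) ([], none)

lemma enum_getElem {α : Type} : ∀ (xs : List α) (s : Int) (k : Nat) (h : k < xs.length),
    (PySem.List.enumerate xs s)[k]'(by simpa [PySem.List.length_enumerate] using h) = (s + k, xs[k]) := by
  intro xs
  induction xs with
  | nil => intro s k h; simp at h
  | cons x xs ih =>
      intro s k h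
      cases k with
      | zero => simp [PySem.List.enumerate_cons]
      | succ n =>
          have hn : n < xs.length := by simpa using h
          have := ih (s+1) n hn
          simp only [PySem.List.enumerate_cons, List.getElem_cons_succ, this]
          rw [show s + 1 + (n:Int) = s + ((n+1 : Nat) : Int) by push_cast; ring]

-- the enumerated pair list of B, rewritten as a map over the index range A-style coupling can use
lemma enumZip_eq (arr : List Int) :
    PySem.List.enumerate ((arr.zip (arr.drop 1)).map (fun p => (p.1, p.2))) 1 =
      (PySem.List.pyRange 1 (arr.length : Int) 1).map
        (fun i => (i, PySem.List.pyGetD arr (i-1) 0, PySem.List.pyGetD arr i 0)) := by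
  apply List.ext_getElem
  · simp [PySem.List.length_enumerate, PySem.List.length_pyRange_one, List.length_zip]
  · intro k h1 h2
    have hz : k < (arr.zip (arr.drop 1)).length := by
      simpa [PySem.List.length_enumerate] using h1
    have hk1 : k + 1 < arr.length := by
      simp [List.length_zip] at hz; omega
    rw [List.getElem_map]
    rw [enum_getElem ((arr.zip (arr.drop 1)).map (fun p => (p.1, p.2))) 1 k (by simpa using hz)]
    rw [PySem.List.getElem_pyRange_one]
    simp only [List.getElem_map, List.getElem_zip, List.getElem_drop]
    have e1 : PySem.List.pyGetD arr ((1:Int) + k - 1) 0 = arr[k] := by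
      have : (1:Int) + k - 1 = ((k : Nat) : Int) := by ring
      rw [this, PySem.List.pyGetD_natCast]
      exact List.getD_eq_getElem arr 0 (by omega)
    have e2 : PySem.List.pyGetD arr ((1:Int) + k) 0 = arr[k+1] := by
      have : (1:Int) + k = ((k + 1 : Nat) : Int) := by push_cast; ring
      rw [this, PySem.List.pyGetD_natCast]
      exact List.getD_eq_getElem arr 0 (by omega)
    simp only [e1, e2]
    have : arr[1+k]'(by omega) = arr[k+1] := by congr 1; omega
    rw [this]

-- the coupling invariant between A's state after el < k and B's state after pair i ≤ k
def pvInv (arr : List Int) (k : Int) : Prop :=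
  let g := fun i => PySem.List.pyGetD arr i 0
  let a := afold arr k
  let b := bfold arr (k+1)
  a.1 = b.1 ∧ a.2.1 = a.1.map g ∧
  (g (k-1) < g k → b.2 = some k ∧ a.2.2 = none) ∧
  (g (k-1) = g k → b.2 = a.2.2) ∧
  (g (k-1) > g k → b.2 = none ∧ a.2.2 = none)

lemma afold_succ (arr : List Int) (k : Int) (hk : 1 ≤ k) :
    afold arr (k+1) = stepA arr (afold arr k) k := by
  unfold afold
  rw [PySem.List.pyRange_one_succ_right hk, List.foldl_append]
  rfl

lemma bfold_succ (arr : List Int) (k : Int) (hk : 1 ≤ k) :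
    bfold arr (k+1) = stepB (bfold arr k) (k, PySem.List.pyGetD arr (k-1) 0, PySem.List.pyGetD arr k 0) := by
  unfold bfold
  rw [PySem.List.pyRange_one_succ_right hk, List.foldl_append]
  rfl

lemma pvInv_one (arr : List Int) : pvInv arr 1 := by
  have h0 : afold arr 1 = ([], [], none) := by
    unfold afold; rw [PySem.List.pyRange_one_eq_nil le_rfl]; rfl
  have h1 : bfold arr 2 = stepB ([], none) (1, PySem.List.pyGetD arr 0 0, PySem.List.pyGetD arr 1 0) := by
    unfold bfold
    rw [show (2:Int) = 1 + 1 by norm_num, PySem.List.pyRange_one_singleton]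
    rfl
  unfold pvInv
  rw [h0, show (1:Int)+1 = 2 by norm_num, h1]
  unfold stepB
  dsimp only
  rcases lt_trichotomy (PySem.List.pyGetD arr 0 0) (PySem.List.pyGetD arr 1 0) with h | h | h <;>
    split_ifs <;> simp_all <;> omega

lemma pvInv_succ (arr : List Int) (k : Int) (hk : 1 ≤ k) (h : pvInv arr k) : pvInv arr (k+1) := by
  unfold pvInv at h ⊢
  rw [afold_succ arr k hk, bfold_succ arr (k+1) (by omega)]
  generalize hA : afold arr k = a at *
  generalize hB : bfold arr (k+1) = b at *
  obtain ⟨posA, peaksA, pl⟩ := a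
  obtain ⟨posB, pr⟩ := b
  simp only at h
  obtain ⟨hpos, hpeaks, hlt, heq, hgt⟩ := h
  subst hpos hpeaks
  unfold stepA stepB
  dsimp only
  simp only [show k+1-1 = k by ring]
  rcases lt_trichotomy (PySem.List.pyGetD arr (k-1) 0) (PySem.List.pyGetD arr k 0) with h1 | h1 | h1 <;>
    rcases lt_trichotomy (PySem.List.pyGetD arr k 0) (PySem.List.pyGetD arr (k+1) 0) with h2 | h2 | h2 <;>
    [obtain ⟨hpr, hpl⟩ := hlt h1; obtain ⟨hpr, hpl⟩ := hlt h1; obtain ⟨hpr, hpl⟩ := hlt h1;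
     have hpr := heq h1; have hpr := heq h1; have hpr := heq h1;
     obtain ⟨hpr, hpl⟩ := hgt h1; obtain ⟨hpr, hpl⟩ := hgt h1; obtain ⟨hpr, hpl⟩ := hgt h1] <;>
    (try subst hpr) <;> (try subst hpl)
  all_goals split_ifs <;> simp_all <;> omega

lemma pvInv_all (arr : List Int) (k : Int) (h1 : 1 ≤ k) : pvInv arr k := by
  have h : ∀ m : Nat, pvInv arr (1 + (m : Int)) := by
    intro m
    induction m with
    | zero => simpa using pvInv_one arr
    | succ n ih =>
        have h2 := pvInv_succ arr (1 + (n : Int)) (by omega) ih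
        have he : (1:Int) + ((n + 1 : Nat) : Int) = (1 + (n : Int)) + 1 := by push_cast; ring
        rw [he]; exact h2
  have hk : k = 1 + ((k - 1).toNat : Int) := by omega
  rw [hk]; exact h _

-- ===== VERDICT (by name: the statement is the Claim_ definition above) =====
theorem pick_peaks_spec : Claim_equal_pick_peaks := by
  intro arr _
  unfold Spec_pick_peaks
  simp only [pick_peaks, pick_peaks_alt, enumZip_eq, List.foldl_map]
  by_cases hlen : (arr.length : Int) ≤ 1
  · rw [PySem.List.pyRange_one_eq_nil (by omega), PySem.List.pyRange_one_eq_nil (by omega)]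
    rfl
  · have h := pvInv_all arr ((arr.length : Int) - 1) (by omega)
    unfold pvInv at h
    obtain ⟨hpos, hpeaks, -⟩ := h
    unfold afold bfold at hpos
    unfold afold at hpeaks
    rw [show (arr.length : Int) - 1 + 1 = (arr.length : Int) by ring] at hpos
    simp only [hpos] at hpeaks ⊢
    simp only [hpeaks]
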